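-- pv_equiv track=rewrite | github.com/mandiant/flare-floss | floss/language/go/extract_elf.py | _iter_anchor_indices
-- ===== SOURCE A (Python) =====
-- from typing import Dict, List, Tuple, Iterable
--
-- def _iter_anchor_indices(run_start: int, run_end: int) -> Iterable[int]:
--     """
--     Sometimes the midpoint candidate is invalid (not UTF-8 or not a real Go string)
--     by trying nearby candidates, FLOSS can recover and find a valid blob anchor
--     """
--     run_mid = (run_start + run_end) // 2
--     yield run_mid
--
--     for delta in range(1, run_end - run_start + 1):
--         left = run_mid - delta
--         right = run_mid + delta
--
--         if left >= run_start:
--             yield left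
--         if right <= run_end:
--             yield right
-- ===== SOURCE B (Python) =====
-- def _iter_anchor_indices(run_start: int, run_end: int):
--     """Yield run_mid first, then all other indices of the run ordered by
--     distance from run_mid, left neighbour before right at equal distance."""
--     run_mid = (run_start + run_end) // 2
--     yield run_mid
--     candidates = [i for i in range(run_start, run_end + 1) if i != run_mid]
--     yield from sorted(candidates, key=lambda i: (abs(i - run_mid), i > run_mid))
-- ===== Notes on version B (the rewrite author's own statement) =====
-- stated objective: simpler
-- what changed: Replace the delta loop with per-delta bound checks by building the candidate index list once and sorting it by (distance from midpoint, side), which yields the same outward order declaratively.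
import Mathlib
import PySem

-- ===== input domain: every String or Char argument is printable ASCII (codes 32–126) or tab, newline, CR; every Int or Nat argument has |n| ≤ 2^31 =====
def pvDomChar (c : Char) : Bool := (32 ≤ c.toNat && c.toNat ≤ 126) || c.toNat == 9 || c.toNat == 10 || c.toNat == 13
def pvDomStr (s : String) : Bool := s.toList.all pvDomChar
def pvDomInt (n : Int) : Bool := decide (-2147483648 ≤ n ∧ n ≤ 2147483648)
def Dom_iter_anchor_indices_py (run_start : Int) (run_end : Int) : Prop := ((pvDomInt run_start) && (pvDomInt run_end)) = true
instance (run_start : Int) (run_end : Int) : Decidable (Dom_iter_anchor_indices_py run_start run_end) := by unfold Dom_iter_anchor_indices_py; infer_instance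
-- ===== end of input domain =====

-- B replaces A's delta loop (with per-delta bound checks) by a sort of the candidate
-- index list by (distance from midpoint, side); objective: simpler/declarative, not faster.

-- ===== PORT A =====
def iter_anchor_indices_py (run_start : Int) (run_end : Int) : List Int :=
  let run_mid := PySem.Int.floordiv (run_start + run_end) 2
  run_mid ::
    (PySem.List.pyRange 1 (run_end - run_start + 1) 1).foldl (fun acc delta =>
      let left := run_mid - delta
      let right := run_mid + delta
      let acc1 := if left ≥ run_start then acc ++ [left] else acc
      if right ≤ run_end then acc1 ++ [right] else acc1) []

-- ===== PORT B =====
def iter_anchor_indices_py_alt (run_start : Int) (run_end : Int) : List Int :=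
  let run_mid := PySem.Int.floordiv (run_start + run_end) 2
  let candidates := (PySem.List.pyRange run_start (run_end + 1) 1).filter (fun i => decide (i ≠ run_mid))
  run_mid :: PySem.List.sorted2 candidates (fun i => |i - run_mid|) (fun i => decide (i > run_mid))

-- ===== PRECONDITION & SPEC =====
def Spec_iter_anchor_indices_py (run_start : Int) (run_end : Int) (out : List Int) : Prop := out = iter_anchor_indices_py_alt run_start run_end
instance (run_start : Int) (run_end : Int) (out : List Int) : Decidable (Spec_iter_anchor_indices_py run_start run_end out) := by unfold Spec_iter_anchor_indices_py; infer_instance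

-- ===== CLAIM (what is proved, stated in full; the proofs are below) =====
def Claim_equal_iter_anchor_indices_py : Prop := ∀ (run_start : Int) (run_end : Int), Dom_iter_anchor_indices_py run_start run_end → Spec_iter_anchor_indices_py run_start run_end (iter_anchor_indices_py run_start run_end)

-- ===== LEMMAS AND PROOFS =====

/-- the two indices A's loop may emit at a given delta `d` -/
def pvBlock (s e m d : Int) : List Int :=
  (if s ≤ m - d then [m - d] else []) ++ (if m + d ≤ e then [m + d] else [])

/-- integer key equivalent to Python's tuple key (abs(i-m), i > m) -/
def pvKey (m i : Int) : Int := 2 * |i - m| + (if m < i then 1 else 0)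

lemma pv_foldl_eq_flatMap (s e m : Int) (l : List Int) (init : List Int) :
    l.foldl (fun acc delta =>
      let left := m - delta
      let right := m + delta
      let acc1 := if left ≥ s then acc ++ [left] else acc
      if right ≤ e then acc1 ++ [right] else acc1) init
      = init ++ l.flatMap (pvBlock s e m) := by
  induction l generalizing init with
  | nil => simp
  | cons d t ih =>
      simp only [List.foldl_cons, List.flatMap_cons, ih, pvBlock]
      split_ifs <;> simp

lemma pv_before_eq (m a b : Int) :
    (decide (|a - m| < |b - m|) ||
      (!decide (|b - m| < |a - m|) && decide ((decide (a > m)) < (decide (b > m)))))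
    = decide (pvKey m a < pvKey m b) := by
  have hb : ∀ (p q : Bool), decide (p < q) = (!p && q) := by decide
  rw [hb, Bool.eq_iff_iff]
  rcases abs_cases (a - m) with ⟨ha, ha'⟩ | ⟨ha, ha'⟩ <;>
    rcases abs_cases (b - m) with ⟨hc, hc'⟩ | ⟨hc, hc'⟩ <;>
    · simp only [pvKey, ha, hc, Bool.or_eq_true, Bool.and_eq_true, Bool.not_eq_true',
        decide_eq_true_eq, decide_eq_false_iff_not, gt_iff_lt]
      split_ifs <;> omega

lemma pv_sorted2_eq_sorted (m : Int) (cands : List Int) :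
    PySem.List.sorted2 cands (fun i => |i - m|) (fun i => decide (i > m))
      = PySem.List.sorted cands (pvKey m) := by
  rw [PySem.List.sorted_eq_foldl_insertBy]
  show List.foldl (fun acc x => PySem.List.insertBy
      (fun a b => decide (|a - m| < |b - m|) ||
        (!decide (|b - m| < |a - m|) && decide ((decide (a > m)) < (decide (b > m))))) x acc) [] cands
    = _
  have hfn : (fun (a b : Int) => decide (|a - m| < |b - m|) ||
        (!decide (|b - m| < |a - m|) && decide ((decide (a > m)) < (decide (b > m)))))
      = (fun a b => decide (pvKey m a < pvKey m b)) := by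
    funext a b; exact pv_before_eq m a b
  rw [hfn]

lemma pv_mem_block_iff (s e m d x : Int) :
    x ∈ pvBlock s e m d ↔ ((x = m - d ∧ s ≤ m - d) ∨ (x = m + d ∧ m + d ≤ e)) := by
  simp only [pvBlock, List.mem_append]
  split_ifs <;> simp <;> omega

lemma pv_key_left (m d : Int) (hd : 1 ≤ d) : pvKey m (m - d) = 2 * d := by
  have hml : |m - d - m| = d := by
    rw [show m - d - m = -d by ring, abs_neg, abs_of_pos (by omega)]
  simp only [pvKey, hml]
  rw [if_neg (by omega)]
  ring

lemma pv_key_right (m d : Int) (hd : 1 ≤ d) : pvKey m (m + d) = 2 * d + 1 := by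
  have hmr : |m + d - m| = d := by rw [show m + d - m = d by ring, abs_of_pos (by omega)]
  simp only [pvKey, hmr]
  rw [if_pos (by omega)]

lemma pv_key_block (s e m d : Int) (hd : 1 ≤ d) :
    ∀ x ∈ pvBlock s e m d, pvKey m x = 2 * d ∨ pvKey m x = 2 * d + 1 := by
  intro x hx
  rcases (pv_mem_block_iff s e m d x).1 hx with ⟨h, _⟩ | ⟨h, _⟩
  · subst h; exact Or.inl (pv_key_left m d hd)
  · subst h; exact Or.inr (pv_key_right m d hd)

lemma pv_block_pairwise (s e m d : Int) (hd : 1 ≤ d) :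
    (pvBlock s e m d).Pairwise (fun a b => pvKey m a < pvKey m b) := by
  unfold pvBlock
  split_ifs
  · refine List.Pairwise.cons ?_ (List.pairwise_singleton _ _)
    intro y hy
    simp only [List.append_eq, List.nil_append, List.mem_singleton] at hy
    subst hy
    rw [pv_key_left m d hd, pv_key_right m d hd]
    omega
  · exact List.pairwise_singleton _ _
  · exact List.pairwise_singleton _ _
  · exact List.Pairwise.nil

lemma pv_flat_pairwise (s e m : Int) : ∀ n : Nat,
    ((PySem.List.pyRange 1 (1 + n) 1).flatMap (pvBlock s e m)).Pairwise
        (fun a b => pvKey m a < pvKey m b)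
    ∧ ∀ x ∈ (PySem.List.pyRange 1 (1 + n) 1).flatMap (pvBlock s e m),
        pvKey m x < 2 * (1 + (n : Int)) := by
  intro n
  induction n with
  | zero =>
      rw [show ((1 : Int) + (0 : Nat)) = 1 by norm_num, PySem.List.pyRange_one_eq_nil (le_refl 1)]
      simp
  | succ k ih =>
      have hsplit : PySem.List.pyRange 1 (1 + ((k : Int) + 1)) 1
          = PySem.List.pyRange 1 (1 + (k : Int)) 1 ++ [1 + (k : Int)] := by
        rw [show (1 : Int) + ((k : Int) + 1) = (1 + (k : Int)) + 1 by ring]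
        exact PySem.List.pyRange_one_succ_right (by omega)
      push_cast
      rw [hsplit, List.flatMap_append]
      obtain ⟨ihp, ihb⟩ := ih
      constructor
      · rw [List.pairwise_append]
        refine ⟨ihp, ?_, ?_⟩
        · simp only [List.flatMap_cons, List.flatMap_nil, List.append_nil]
          exact pv_block_pairwise s e m _ (by omega)
        · intro a ha b hbmem
          simp only [List.flatMap_cons, List.flatMap_nil, List.append_nil] at hbmem
          have hk := pv_key_block s e m (1 + (k : Int)) (by omega) b hbmem
          have := ihb a ha
          omega
      · intro x hx
        rw [List.mem_append] at hx
        rcases hx with hx | hx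
        · have := ihb x hx; omega
        · simp only [List.flatMap_cons, List.flatMap_nil, List.append_nil] at hx
          have := pv_key_block s e m (1 + (k : Int)) (by omega) x hx
          omega

lemma pv_mem_flat_iff (s e : Int) (hse : s ≤ e) (x : Int) :
    x ∈ (PySem.List.pyRange 1 (e - s + 1) 1).flatMap
          (pvBlock s e (PySem.Int.floordiv (s + e) 2))
      ↔ (s ≤ x ∧ x ≤ e ∧ x ≠ PySem.Int.floordiv (s + e) 2) := by
  set m := PySem.Int.floordiv (s + e) 2 with hm
  have hmb := PySem.Int.floordiv_two_mid_bounds hse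
  rw [← hm] at hmb
  simp only [List.mem_flatMap, PySem.List.mem_pyRange_one, pv_mem_block_iff]
  constructor
  · rintro ⟨d, ⟨hd1, hd2⟩, h | h⟩ <;> omega
  · rintro ⟨h1, h2, h3⟩
    by_cases hx : x < m
    · exact ⟨m - x, by omega, by omega⟩
    · exact ⟨x - m, by omega, by omega⟩

lemma pv_nodup_of_pairwise_key (m : Int) (l : List Int)
    (h : l.Pairwise (fun a b => pvKey m a < pvKey m b)) : l.Nodup := by
  refine h.imp ?_
  intro a b hab heq
  subst heq
  exact absurd hab (lt_irrefl _)

-- ===== VERDICT (by name: the statement is the Claim_ definition above) =====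
theorem iter_anchor_indices_py_spec : Claim_equal_iter_anchor_indices_py := by
  intro s e _
  unfold Spec_iter_anchor_indices_py iter_anchor_indices_py iter_anchor_indices_py_alt
  simp only []
  set m := PySem.Int.floordiv (s + e) 2 with hm
  rw [pv_foldl_eq_flatMap s e m, List.nil_append, pv_sorted2_eq_sorted]
  congr 1
  set cands := (PySem.List.pyRange s (e + 1) 1).filter (fun i => decide (i ≠ m)) with hcands
  have hcand_mem : ∀ x, x ∈ cands ↔ (s ≤ x ∧ x ≤ e ∧ x ≠ m) := by
    intro x
    simp only [hcands, List.mem_filter, PySem.List.mem_pyRange_one, decide_eq_true_eq]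
    omega
  have hcand_nodup : cands.Nodup := (PySem.List.nodup_pyRange_one _ _).filter _
  by_cases hD : e - s + 1 ≤ 1
  · -- degenerate: the loop runs zero times and there are no candidates besides run_mid
    rw [PySem.List.pyRange_one_eq_nil hD, List.flatMap_nil]
    have hcnil : cands = [] := by
      by_cases hse : s ≤ e
      · have hs_eq : s = e := by omega
        have hms : m = s := by
          rw [hm, PySem.Int.floordiv_eq_iff_of_pos (by norm_num)]
          omega
        rcases h : cands with _ | ⟨c, t⟩
        · rfl
        · have : c ∈ cands := by rw [h]; exact List.mem_cons_self
          rw [hcand_mem] at this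
          omega
      · rcases h : cands with _ | ⟨c, t⟩
        · rfl
        · have : c ∈ cands := by rw [h]; exact List.mem_cons_self
          rw [hcand_mem] at this
          omega
    rw [hcnil]
    rfl
  · -- main case: s < e
    have hse : s ≤ e := by omega
    set tail := (PySem.List.pyRange 1 (e - s + 1) 1).flatMap (pvBlock s e m) with htail
    obtain ⟨hpair, _⟩ := pv_flat_pairwise s e m (e - s).toNat
    rw [show (1 : Int) + ((e - s).toNat : Int) = e - s + 1 by omega] at hpair
    rw [← htail] at hpair
    have htail_nodup : tail.Nodup := pv_nodup_of_pairwise_key m tail hpair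
    have hperm : tail.Perm cands := by
      rw [List.perm_ext_iff_of_nodup htail_nodup hcand_nodup]
      intro x
      rw [hcand_mem x, htail, hm]
      exact pv_mem_flat_iff s e hse x
    exact (PySem.List.sorted_eq_of_perm_of_pairwise_lt cands tail (pvKey m) hperm hpair).symm
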